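-- pv_equiv track=rewrite | github.com/androbaza/PeakLoc | localization_scripts/roi_generation.py | split_dict_to_multiple
-- ===== SOURCE A (Python) =====
-- import copy
--
-- def split_dict_to_multiple(input_dict, num_cores):
--     """Splits dict into multiple dicts with given maximum size.
--     Returns a list of dictionaries."""
--     num_nonzero = 0
--     for value in input_dict.values():
--         if value != []:
--             num_nonzero += 1
--     max_limit = len(list(input_dict.keys())) // num_cores + 1
--     chunks = []
--     curr_dict = {}
--     for k, v in input_dict.items():
--         if v == []:
--             continue
--         if len(curr_dict.keys()) < max_limit:
--             curr_dict.update({k: v})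
--         else:
--             chunks.append(copy.deepcopy(curr_dict))
--             curr_dict = {k: v}
--     chunks.append(curr_dict)
--     return chunks
-- ===== SOURCE B (Python) =====
-- def split_dict_to_multiple(input_dict, num_cores):
--     """Splits dict into multiple dicts with given maximum size.
--     Returns a list of dictionaries."""
--     max_limit = len(input_dict) // num_cores + 1
--     items = [(k, v) for k, v in input_dict.items() if v != []]
--     if not items:
--         return [{}]
--     chunks = []
--     while items:
--         chunks.append(dict(items[:max_limit]))
--         items = items[max_limit:]
--     return chunks
-- ===== Notes on version B (the rewrite author's own statement) =====
-- stated objective: simpler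
-- what changed: Instead of A's one-pass buffer that is flushed into chunks when it fills (plus an unused num_nonzero counter), B filters the non-empty items once and then slices that list into max_limit-sized chunks with a while loop, returning [{}] when no item survives the filter.
-- outside the precondition, e.g. on split_dict_to_multiple({'a': [1]}, -1): A returns [{}, {'a': [1]}], B does not finish within the time limit
import Mathlib
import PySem

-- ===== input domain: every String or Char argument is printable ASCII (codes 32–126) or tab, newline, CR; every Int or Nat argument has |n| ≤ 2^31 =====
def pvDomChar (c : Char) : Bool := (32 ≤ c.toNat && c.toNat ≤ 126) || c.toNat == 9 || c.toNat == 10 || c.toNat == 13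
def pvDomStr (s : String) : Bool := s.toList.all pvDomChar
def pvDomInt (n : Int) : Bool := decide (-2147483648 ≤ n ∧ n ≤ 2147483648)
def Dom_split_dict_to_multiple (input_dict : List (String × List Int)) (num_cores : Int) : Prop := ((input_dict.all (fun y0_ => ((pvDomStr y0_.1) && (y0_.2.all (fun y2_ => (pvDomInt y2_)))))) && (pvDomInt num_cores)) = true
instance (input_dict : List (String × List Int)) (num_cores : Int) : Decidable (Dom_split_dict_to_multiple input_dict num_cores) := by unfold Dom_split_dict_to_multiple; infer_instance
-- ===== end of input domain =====

-- B replaces A's fill-and-flush buffer by a one-shot filter of the non-empty items followed by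
-- slicing that list into max_limit-sized chunks (and drops A's unused num_nonzero counter).
-- Equivalence of the RETURN values on Pre_ (positive num_cores, no duplicate keys).

-- ===== PORT A =====
def split_dict_to_multiple (input_dict : List (String × List Int)) (num_cores : Int) : List (List (String × List Int)) :=
  let _num_nonzero : Int := input_dict.foldl (fun acc kv => if kv.2 ≠ [] then acc + 1 else acc) 0
  let max_limit : Int := PySem.Int.floordiv (input_dict.length : Int) num_cores + 1
  let st := input_dict.foldl
    (fun (st : List (List (String × List Int)) × PySem.Dict String (List Int)) kv =>
      if kv.2 = [] then st
      else if ((st.2.size : Int) < max_limit) then (st.1, st.2.insert kv.1 kv.2)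
      else (st.1 ++ [st.2.items], PySem.Dict.ofList [kv]))
    ([], PySem.Dict.empty)
  st.1 ++ [st.2.items]

-- ===== PORT B =====
-- the 'while items:' loop of Source B; fuel (= initial length) only makes the recursion structural
def pvBChunks (max_limit : Int) : Nat → List (String × List Int) → List (List (String × List Int))
  | 0, _ => []
  | fuel + 1, items =>
      if items = [] then []
      else (PySem.Dict.ofList (PySem.List.slice items none (some max_limit))).items
             :: pvBChunks max_limit fuel (PySem.List.slice items (some max_limit) none)

def split_dict_to_multiple_alt (input_dict : List (String × List Int)) (num_cores : Int) : List (List (String × List Int)) :=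
  let max_limit : Int := PySem.Int.floordiv (input_dict.length : Int) num_cores + 1
  let items := input_dict.filter (fun kv => kv.2 ≠ [])
  if items = [] then [[]]
  else pvBChunks max_limit items.length items

-- ===== PRECONDITION & SPEC =====
-- Pre_ excludes num_cores ≤ 0 (at 0 the Python A raises ZeroDivisionError; a negative core count is
-- outside the function's natural domain and B's while loop does not terminate there) and association
-- lists with duplicate keys, which do not represent a Python dict.
def Pre_split_dict_to_multiple (input_dict : List (String × List Int)) (num_cores : Int) : Prop :=
  1 ≤ num_cores ∧ (input_dict.map Prod.fst).Nodup
instance (input_dict : List (String × List Int)) (num_cores : Int) : Decidable (Pre_split_dict_to_multiple input_dict num_cores) := by unfold Pre_split_dict_to_multiple; infer_instance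

def pvWitness_split_dict_to_multiple : (List (String × List Int)) × Int :=
  ([("a", [1]), ("b", []), ("c", [2, 3])], 2)

def Spec_split_dict_to_multiple (input_dict : List (String × List Int)) (num_cores : Int) (out : List (List (String × List Int))) : Prop := out = split_dict_to_multiple_alt input_dict num_cores
instance (input_dict : List (String × List Int)) (num_cores : Int) (out : List (List (String × List Int))) : Decidable (Spec_split_dict_to_multiple input_dict num_cores out) := by unfold Spec_split_dict_to_multiple; infer_instance

-- ===== CLAIM (what is proved, stated in full; the proofs are below) =====
def Claim_equal_split_dict_to_multiple : Prop := ∀ (input_dict : List (String × List Int)) (num_cores : Int), Dom_split_dict_to_multiple input_dict num_cores → Pre_split_dict_to_multiple input_dict num_cores → Spec_split_dict_to_multiple input_dict num_cores (split_dict_to_multiple input_dict num_cores)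

-- ===== LEMMAS AND PROOFS =====

-- the flush step of A's loop, once the 'v == []' skip has been pushed into a filter
def pvStep (m : Int)
    (st : List (List (String × List Int)) × PySem.Dict String (List Int))
    (kv : String × List Int) :
    List (List (String × List Int)) × PySem.Dict String (List Int) :=
  if ((st.2.size : Int) < m) then (st.1, st.2.insert kv.1 kv.2)
  else (st.1 ++ [st.2.items], PySem.Dict.ofList [kv])

lemma pvBChunks_nil (m : Int) (f : Nat) : pvBChunks m f [] = [] := by
  cases f <;> simp [pvBChunks]

lemma items_ofList_of_nodup (l : List (String × List Int))
    (h : (l.map Prod.fst).Nodup) : (PySem.Dict.ofList l).items = l := by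
  have := PySem.Dict.items_foldl_insert_fresh (l := l) (k := Prod.fst) (v := Prod.snd)
    (d := PySem.Dict.empty) (by simp [PySem.Dict.contains_empty]) h
  simpa [PySem.Dict.ofList] using this

lemma pvBChunks_fuel (n : Nat) (hn : 1 ≤ n) :
    ∀ (f1 : Nat) (f2 : Nat) (xs : List (String × List Int)),
      xs.length ≤ f1 → xs.length ≤ f2 →
      pvBChunks (n : Int) f1 xs = pvBChunks (n : Int) f2 xs := by
  intro f1
  induction f1 with
  | zero => intro f2 xs h1 h2
            have : xs = [] := by cases xs <;> simp_all
            subst this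
            cases f2 <;> simp [pvBChunks]
  | succ a ih =>
      intro f2 xs h1 h2
      cases xs with
      | nil => cases f2 <;> simp [pvBChunks]
      | cons x xs' =>
        cases f2 with
        | zero => simp at h2
        | succ b =>
          simp only [pvBChunks, if_neg (by simp : ¬(x :: xs' = []))]
          congr 1
          rw [PySem.List.slice_from_natCast]
          have hl : (List.drop n (x :: xs')).length ≤ a ∧ (List.drop n (x :: xs')).length ≤ b := by
            simp only [List.length_drop, List.length_cons]
            simp only [List.length_cons] at h1 h2
            omega
          exact ih b _ hl.1 hl.2

lemma pvLoopA (n : Nat) (hn : 1 ≤ n) :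
    ∀ (xs : List (String × List Int)) (d : PySem.Dict String (List Int))
      (chunks : List (List (String × List Int))) (fuel : Nat),
      1 ≤ d.items.length → d.items.length ≤ n →
      d.items.length + xs.length ≤ fuel →
      ((d.items ++ xs).map Prod.fst).Nodup →
      (xs.foldl (pvStep (n : Int)) (chunks, d)).1 ++ [(xs.foldl (pvStep (n : Int)) (chunks, d)).2.items]
        = chunks ++ pvBChunks (n : Int) fuel (d.items ++ xs) := by
  intro xs
  induction xs with
  | nil =>
    intro d chunks fuel h1 h2 hf hnd
    simp only [List.foldl_nil, List.append_nil] at *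
    cases fuel with
    | zero => omega
    | succ f =>
      have hne : d.items ≠ [] := by cases h : d.items <;> simp_all
      simp only [pvBChunks, if_neg hne]
      rw [PySem.List.slice_to_natCast, PySem.List.slice_from_natCast]
      rw [List.take_of_length_le h2, List.drop_of_length_le h2, pvBChunks_nil]
      rw [items_ofList_of_nodup _ hnd]
  | cons x xs' ih =>
    intro d chunks fuel h1 h2 hf hnd
    rw [List.foldl_cons]
    by_cases hlt : ((d.size : Int) < (n : Int))
    · -- room in the buffer: insert
      have hmem : x.1 ∉ d.items.map Prod.fst := by
        have h' : (d.items.map Prod.fst).Disjoint ((x :: xs').map Prod.fst) :=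
          List.disjoint_of_nodup_append (by simpa [List.map_append] using hnd)
        intro hmem
        exact h' hmem (by simp)
      have hfresh : d.contains x.1 = false := by
        rw [PySem.Dict.contains_eq_decide_mem_keys]
        rw [show d.keys = d.items.map Prod.fst from rfl]
        simpa using hmem
      have hins : (d.insert x.1 x.2).items = d.items ++ [x] := by
        simpa using PySem.Dict.items_insert_of_not_contains d x.2 hfresh
      have hstep : pvStep (n : Int) (chunks, d) x = (chunks, d.insert x.1 x.2) := by
        simp [pvStep, hlt]
      rw [hstep]
      have hsize : d.items.length < n := by
        have : (d.size : Int) = (d.items.length : Int) := by simp [PySem.Dict.size]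
        omega
      have := ih (d.insert x.1 x.2) chunks fuel
        (by rw [hins]; simp)
        (by rw [hins]; simp only [List.length_append, List.length_cons, List.length_nil]; omega)
        (by rw [hins]
            have h' := hf
            simp only [List.length_append, List.length_cons, List.length_nil] at h' ⊢
            omega)
        (by rw [hins]; simpa using hnd)
      rw [this, hins]
      simp
    · -- buffer full: flush
      have hsize : d.items.length = n := by
        have : (d.size : Int) = (d.items.length : Int) := by simp [PySem.Dict.size]
        omega
      have hstep : pvStep (n : Int) (chunks, d) x
          = (chunks ++ [d.items], PySem.Dict.ofList [x]) := by
        simp [pvStep, hlt]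
      rw [hstep]
      have hitems1 : (PySem.Dict.ofList [x]).items = [x] :=
        items_ofList_of_nodup [x] (by simp)
      have hnd' : (((PySem.Dict.ofList [x]).items ++ xs').map Prod.fst).Nodup := by
        rw [hitems1]
        exact hnd.sublist ((List.sublist_append_right _ _).map _)
      have := ih (PySem.Dict.ofList [x]) (chunks ++ [d.items]) (1 + xs'.length)
        (by rw [hitems1]; simp)
        (by rw [hitems1]; simpa using hn)
        (by rw [hitems1]; simp)
        hnd'
      rw [this, hitems1]
      -- now reduce the RHS pvBChunks step
      cases fuel with
      | zero => simp only [List.length_cons] at hf; omega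
      | succ f =>
        have hne : d.items ++ x :: xs' ≠ [] := by
          cases h : d.items <;> simp_all
        conv_rhs => rw [pvBChunks]
        rw [if_neg hne]
        rw [PySem.List.slice_to_natCast, PySem.List.slice_from_natCast]
        rw [show List.take n (d.items ++ x :: xs') = d.items by
              rw [← hsize]; exact List.take_left,
            show List.drop n (d.items ++ x :: xs') = x :: xs' by
              rw [← hsize]; exact List.drop_left]
        rw [items_ofList_of_nodup d.items (hnd.sublist ((List.sublist_append_left _ _).map _))]
        rw [pvBChunks_fuel n hn f (1 + xs'.length) (x :: xs')
              (by simp only [List.length_cons] at hf ⊢; omega)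
              (by simp)]
        simp
lemma pvFoldSkip (m : Int) :
    ∀ (l : List (String × List Int)) (st : List (List (String × List Int)) × PySem.Dict String (List Int)),
      l.foldl (fun st kv => if kv.2 = [] then st else pvStep m st kv) st
        = (l.filter (fun kv => kv.2 ≠ [])).foldl (pvStep m) st := by
  intro l
  induction l with
  | nil => intro st; rfl
  | cons x xs ih =>
    intro st
    by_cases hx : x.2 = []
    · simp [hx, ih]
    · simp [hx, ih]

lemma pvMain (input_dict : List (String × List Int)) (num_cores : Int)
    (hnc : 1 ≤ num_cores) (hnd : (input_dict.map Prod.fst).Nodup) :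
    split_dict_to_multiple input_dict num_cores = split_dict_to_multiple_alt input_dict num_cores := by
  simp only [split_dict_to_multiple, split_dict_to_multiple_alt]
  set m : Int := PySem.Int.floordiv ((input_dict.length : Int)) num_cores + 1 with hmdef
  have hm1 : 1 ≤ m := by
    have h0 : 0 ≤ PySem.Int.floordiv ((input_dict.length : Int)) num_cores := by
      rw [PySem.Int.floordiv_eq_ediv_of_pos (by omega)]
      exact Int.ediv_nonneg (by positivity) (by omega)
    omega
  obtain ⟨n, hn⟩ : ∃ n : Nat, m = (n : Int) := ⟨m.toNat, (Int.toNat_of_nonneg (by omega)).symm⟩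
  have hn1 : 1 ≤ n := by omega
  have hstep : (fun (st : List (List (String × List Int)) × PySem.Dict String (List Int)) (kv : String × List Int) =>
      if kv.2 = [] then st
      else if ((st.2.size : Int) < m) then (st.1, st.2.insert kv.1 kv.2)
      else (st.1 ++ [st.2.items], PySem.Dict.ofList [kv]))
      = (fun st kv => if kv.2 = [] then st else pvStep m st kv) := rfl
  rw [hstep, pvFoldSkip]
  have hnds : ((input_dict.filter (fun kv => kv.2 ≠ [])).map Prod.fst).Nodup :=
    hnd.sublist (List.Sublist.map _ List.filter_sublist)
  cases h : input_dict.filter (fun kv => kv.2 ≠ []) with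
  | nil => simp [PySem.Dict.empty]
  | cons x rest =>
    rw [h] at hnds
    rw [if_neg (by simp)]
    rw [List.foldl_cons]
    have hfirst : pvStep m ([], PySem.Dict.empty) x
        = ([], PySem.Dict.empty.insert x.1 x.2) := by
      simp [pvStep, PySem.Dict.size_empty]; omega
    rw [hfirst]
    have hit : (PySem.Dict.empty.insert x.1 x.2).items = [x] := by
      simpa using PySem.Dict.items_insert_of_not_contains PySem.Dict.empty x.2
        (PySem.Dict.contains_empty _)
    have := pvLoopA n hn1 rest (PySem.Dict.empty.insert x.1 x.2) [] (x :: rest).length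
      (by rw [hit]; simp) (by rw [hit]; simpa using hn1)
      (by rw [hit]; simp only [List.length_cons, List.length_nil]; omega)
      (by rw [hit]; simpa using hnds)
    rw [hn, this, hit]
    simp

-- ===== VERDICT (by name: the statement is the Claim_ definition above) =====
theorem split_dict_to_multiple_spec : Claim_equal_split_dict_to_multiple := by
  intro input_dict num_cores _ hpre
  exact pvMain input_dict num_cores hpre.1 hpre.2
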